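-- pv_equiv track=rewrite | github.com/oouxx/algorithm | test/s2.py | solution
-- ===== SOURCE A (Python) =====
-- def solution(n):
--     max = 0
--     for i in range(1, n + 1):
--         product = 1
--         for j in str(i):
--             product *= int(j)
--         if product > max:
--             max = product
--     return max
-- ===== SOURCE B (Python) =====
-- def solution(n):
--     # Max digit product over 1..n by recursion on the decimal prefix:
--     # the best candidate keeps the prefix's digit product times the last digit,
--     # or drops to a shorter prefix padded with nines.
--     def dig_prod(m):
--         p = 1
--         while m >= 10:
--             p *= m % 10
--             m //= 10
--         return p * m
--
--     def best(m):
--         if m < 10: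
--             return max(m, 0)
--         return max(max(best(m // 10 - 1), 1) * 9, dig_prod(m // 10) * (m % 10))
--
--     return best(n)
-- ===== Notes on version B (the rewrite author's own statement) =====
-- stated objective: faster
-- what changed: Instead of scanning every integer up to n and multiplying the digits of its str(), B recurses on the decimal prefix: the best candidate either keeps n's leading digits or drops one prefix digit and pads with nines, one recursion level per digit.
import Mathlib
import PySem

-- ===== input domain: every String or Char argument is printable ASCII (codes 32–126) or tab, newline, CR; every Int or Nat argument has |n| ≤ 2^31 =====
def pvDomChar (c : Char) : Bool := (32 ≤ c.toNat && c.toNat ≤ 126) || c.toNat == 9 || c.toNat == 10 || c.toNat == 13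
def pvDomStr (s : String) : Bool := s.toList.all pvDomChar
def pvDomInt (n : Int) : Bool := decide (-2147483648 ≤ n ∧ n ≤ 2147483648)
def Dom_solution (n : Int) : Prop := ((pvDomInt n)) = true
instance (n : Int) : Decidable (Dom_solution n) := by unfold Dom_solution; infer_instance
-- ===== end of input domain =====

-- B replaces A's scan of every integer 1..n by a recursion on the decimal prefix
-- (one level per digit), an asymptotically faster algorithm.

-- ===== PORT A =====
-- literal port of A: for i in range(1, n+1): product of int(j) for j in str(i); track max.
-- `int(j)` is ported as `(PySem.Int.ofChars? [j]).getD 0`: every j here is a digit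
-- character of str(i), on which Python's int() never raises, so the default is dead.
def solution (n : Int) : Int :=
  (PySem.List.pyRange 1 (n + 1)).foldl
    (fun mx i =>
      let product : Int :=
        (PySem.Int.toStr i).toList.foldl
          (fun acc j => acc * (PySem.Int.ofChars? [j]).getD 0) 1
      if product > mx then product else mx) 0

-- ===== PORT B =====
-- port of Source B's dig_prod while-loop (state (p, m))
def digProdLoop (p m : Int) : Int :=
  if _h : 10 ≤ m then
    digProdLoop (p * PySem.Int.mod m 10) (PySem.Int.floordiv m 10)
  else p * m
termination_by m.toNat
decreasing_by
  rw [PySem.Int.floordiv_eq_ediv_of_pos (by omega : (0:Int) < 10)]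
  omega

def digProdB (m : Int) : Int := digProdLoop 1 m

-- port of Source B's best
def bestB (m : Int) : Int :=
  if _h : m < 10 then max m 0
  else
    max (max (bestB (PySem.Int.floordiv m 10 - 1)) 1 * 9)
        (digProdB (PySem.Int.floordiv m 10) * PySem.Int.mod m 10)
termination_by m.toNat
decreasing_by
  rw [PySem.Int.floordiv_eq_ediv_of_pos (by omega : (0:Int) < 10)]
  omega

def solution_alt (n : Int) : Int := bestB n

-- ===== PRECONDITION & SPEC =====
def Spec_solution (n : Int) (out : Int) : Prop := out = solution_alt n
instance (n : Int) (out : Int) : Decidable (Spec_solution n out) := by unfold Spec_solution; infer_instance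

-- ===== CLAIM (what is proved, stated in full; the proofs are below) =====
def Claim_equal_solution : Prop := ∀ (n : Int), Dom_solution n → Spec_solution n (solution n)

-- ===== LEMMAS AND PROOFS =====

-- digit product of a natural number
def pNat (m : Nat) : Nat :=
  if h : m < 10 then m else pNat (m / 10) * (m % 10)
termination_by m
decreasing_by omega

-- running maximum of pNat over 1..m (the value A's loop computes)
def fNat : Nat → Nat
  | 0 => 0
  | k + 1 => max (fNat k) (pNat (k + 1))

-- B's recursion, in Nat form
def gNat (m : Nat) : Nat :=
  if h : m < 10 then m
  else max (max (gNat (m / 10 - 1)) 1 * 9) (pNat (m / 10) * (m % 10))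
termination_by m
decreasing_by omega

lemma pNat_small {m : Nat} (h : m < 10) : pNat m = m := by
  rw [pNat]; simp [h]

lemma pNat_big {m : Nat} (h : 10 ≤ m) : pNat m = pNat (m / 10) * (m % 10) := by
  rw [pNat]; simp [Nat.not_lt.mpr h]

lemma fNat_small : ∀ m : Nat, m < 10 → fNat m = m := by
  intro m
  induction m with
  | zero => intro _; rfl
  | succ k ih =>
    intro h
    rw [fNat, ih (by omega), pNat_small h]
    omega

-- key recurrence: the running maximum at 10*q + r
lemma fNat_ten : ∀ q : Nat, 1 ≤ q → ∀ r : Nat, r ≤ 9 →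
    fNat (10 * q + r) = max (max (fNat (q - 1)) 1 * 9) (pNat q * r) := by
  intro q
  induction q using Nat.strong_induction_on with
  | _ q ihq =>
    intro hq r
    induction r with
    | zero =>
      intro _
      rcases Nat.lt_or_ge q 2 with hq1 | hq2
      · -- smallest q: evaluate both sides
        have hq' : q = 1 := by omega
        subst hq'
        have h10 : fNat (10 * 1 + 0) = max (fNat 9) (pNat 10) := by
          show fNat (9 + 1) = _
          rw [fNat]
        rw [h10, fNat_small 9 (by omega), pNat_big (by omega : 10 ≤ 10)]
        rw [pNat_small (by omega : 10 / 10 < 10)]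
        have h0 : fNat (1 - 1) = 0 := rfl
        rw [h0]
        norm_num
      · -- larger q: step back one number and use the outer induction hypothesis
        have hsplit : 10 * q + 0 = (10 * (q - 1) + 9) + 1 := by omega
        rw [hsplit, fNat, ihq (q - 1) (by omega) (by omega) 9 (by omega)]
        have hp : pNat (10 * (q - 1) + 9 + 1) = pNat q * 0 := by
          rw [pNat_big (by omega : 10 ≤ 10 * (q - 1) + 9 + 1)]
          have h1 : (10 * (q - 1) + 9 + 1) / 10 = q := by omega
          have h2 : (10 * (q - 1) + 9 + 1) % 10 = 0 := by omega
          rw [h1, h2]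
        rw [hp]
        -- fNat (q-1) = max (fNat (q-2)) (pNat (q-1))
        have e1 : q - 1 - 1 = q - 2 := by omega
        have e2 : q - 1 = (q - 2) + 1 := by omega
        have hf : fNat (q - 1) = max (fNat (q - 2)) (pNat (q - 1)) := by
          conv_lhs => rw [e2, fNat]
          rw [← e2]
        rw [e1, hf]
        omega
    | succ r ihr =>
      intro hr
      have hstep : fNat (10 * q + (r + 1)) = max (fNat (10 * q + r)) (pNat (10 * q + r + 1)) := by
        rw [show 10 * q + (r + 1) = (10 * q + r) + 1 by omega, fNat]
      have hp : pNat (10 * q + r + 1) = pNat q * (r + 1) := by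
        rw [pNat_big (by omega : 10 ≤ 10 * q + r + 1)]
        have h1 : (10 * q + r + 1) / 10 = q := by omega
        have h2 : (10 * q + r + 1) % 10 = r + 1 := by omega
        rw [h1, h2]
      have hmono : pNat q * r ≤ pNat q * (r + 1) := Nat.mul_le_mul_left _ (by omega)
      rw [hstep, hp, ihr (by omega)]
      omega

lemma gNat_eq_fNat : ∀ m : Nat, gNat m = fNat m := by
  intro m
  induction m using Nat.strong_induction_on with
  | _ m ih =>
    rcases Nat.lt_or_ge m 10 with h | h
    · rw [gNat, fNat_small m h]; simp [h]
    · rw [gNat]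
      simp only [Nat.not_lt.mpr h]
      have hres := fNat_ten (m / 10) (by omega) (m % 10) (by omega)
      rw [ih (m / 10 - 1) (by omega)]
      rw [show fNat m = fNat (10 * (m / 10) + m % 10) by rw [show 10 * (m / 10) + m % 10 = m by omega]]
      exact hres.symm

-- characterisation of Nat.toDigits chars
def mychars (n : Nat) : List Char :=
  if _h : n < 10 then [Nat.digitChar n]
  else mychars (n / 10) ++ [Nat.digitChar (n % 10)]
termination_by n
decreasing_by omega

lemma toDigitsCore_eq : ∀ (fuel n : Nat) (ds : List Char), n < fuel →
    Nat.toDigitsCore 10 fuel n ds = mychars n ++ ds := by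
  intro fuel
  induction fuel with
  | zero => intro n ds h; omega
  | succ fuel ih =>
    intro n ds h
    rw [Nat.toDigitsCore]
    rcases Nat.lt_or_ge n 10 with hn | hn
    · have h0 : n / 10 = 0 := by omega
      simp only [h0]
      rw [mychars]
      simp [hn, Nat.mod_eq_of_lt hn]
    · have h0 : ¬ n / 10 = 0 := by omega
      rw [if_neg h0]
      rw [ih (n / 10) _ (by omega)]
      conv_rhs => rw [mychars]
      rw [dif_neg (by omega : ¬ n < 10)]
      simp

lemma toDigits_eq_mychars (n : Nat) : Nat.toDigits 10 n = mychars n := by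
  rw [Nat.toDigits, toDigitsCore_eq (n + 1) n [] (by omega)]
  simp

lemma val_digitChar (d : Nat) (h : d < 10) :
    (PySem.Int.ofChars? [Nat.digitChar d]).getD 0 = (d : Int) := by
  interval_cases d <;> decide

lemma foldl_mychars (n : Nat) (acc : Int) :
    (mychars n).foldl (fun acc j => acc * (PySem.Int.ofChars? [j]).getD 0) acc
      = acc * (pNat n : Int) := by
  induction n using Nat.strong_induction_on generalizing acc with
  | _ n ih =>
    rcases Nat.lt_or_ge n 10 with h | h
    · rw [mychars, dif_pos h, pNat_small h]
      simp [val_digitChar n h]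
    · rw [mychars, dif_neg (by omega : ¬ n < 10), List.foldl_append,
          ih (n / 10) (by omega) acc, pNat_big h]
      simp [val_digitChar (n % 10) (by omega)]
      ring

lemma inner_product (i : Int) (h : 0 ≤ i) :
    (PySem.Int.toStr i).toList.foldl
        (fun acc j => acc * (PySem.Int.ofChars? [j]).getD 0) 1
      = (pNat i.toNat : Int) := by
  rw [PySem.Int.toList_toStr, PySem.Int.toChars]
  rw [if_neg (by omega : ¬ i < 0), toDigits_eq_mychars, foldl_mychars]
  ring

lemma A_fold (m : Nat) :
    (PySem.List.pyRange 1 ((m : Int) + 1)).foldl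
      (fun mx i =>
        let product : Int :=
          (PySem.Int.toStr i).toList.foldl
            (fun acc j => acc * (PySem.Int.ofChars? [j]).getD 0) 1
        if product > mx then product else mx) 0
    = (fNat m : Int) := by
  induction m with
  | zero =>
    rw [PySem.List.pyRange_one_eq_nil (by omega)]
    rfl
  | succ k ih =>
    rw [show ((k + 1 : Nat) : Int) + 1 = ((k : Int) + 1) + 1 by push_cast; ring,
        PySem.List.pyRange_one_succ_right (by omega), List.foldl_append, ih]
    simp only [List.foldl_cons, List.foldl_nil]
    rw [show (k : Int) + 1 = ((k + 1 : Nat) : Int) by push_cast; ring]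
    rw [inner_product ((k + 1 : Nat) : Int) (by omega)]
    rw [Int.toNat_natCast]
    rw [fNat]
    rcases Nat.lt_or_ge (fNat k) (pNat (k + 1)) with h | h
    · rw [if_pos (by exact_mod_cast h), Nat.max_eq_right (by omega)]
    · rw [if_neg (by exact_mod_cast Nat.not_lt.mpr h), Nat.max_eq_left h]

lemma digProdLoop_eq : ∀ (k : Nat) (p m : Int), 0 ≤ m → m.toNat = k →
    digProdLoop p m = p * (pNat m.toNat : Int) := by
  intro k
  induction k using Nat.strong_induction_on with
  | _ k ih =>
    intro p m h hk
    rw [digProdLoop]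
    rcases lt_or_ge m 10 with hm | hm
    · rw [dif_neg (by omega : ¬ 10 ≤ m), pNat_small (by omega : m.toNat < 10)]
      rw [show ((m.toNat : Nat) : Int) = m by omega]
    · rw [dif_pos hm,
          PySem.Int.floordiv_eq_ediv_of_pos (by omega : (0:Int) < 10),
          PySem.Int.mod_eq_emod_of_pos (by omega : (0:Int) < 10)]
      rw [ih (m / 10).toNat (by omega) _ _ (by omega) rfl]
      rw [show (m / 10).toNat = m.toNat / 10 by omega,
          show m % 10 = ((m.toNat % 10 : Nat) : Int) by omega,
          pNat_big (by omega : 10 ≤ m.toNat)]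
      push_cast
      ring

lemma bestB_eq : ∀ (k : Nat) (m : Int), m.toNat = k → bestB m = (gNat m.toNat : Int) := by
  intro k
  induction k using Nat.strong_induction_on with
  | _ k ih =>
    intro m hk
    rw [bestB]
    rcases lt_or_ge m 10 with hm | hm
    · rw [dif_pos hm, gNat, dif_pos (by omega : m.toNat < 10)]
      omega
    · rw [dif_neg (by omega : ¬ m < 10),
          PySem.Int.floordiv_eq_ediv_of_pos (by omega : (0:Int) < 10),
          PySem.Int.mod_eq_emod_of_pos (by omega : (0:Int) < 10)]
      rw [ih (m / 10 - 1).toNat (by omega) _ rfl]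
      rw [show digProdB (m / 10) = digProdLoop 1 (m / 10) from rfl,
          digProdLoop_eq (m / 10).toNat 1 (m / 10) (by omega) rfl]
      conv_rhs => rw [gNat]
      rw [dif_neg (by omega : ¬ m.toNat < 10)]
      rw [show (m / 10 - 1).toNat = m.toNat / 10 - 1 by omega,
          show (m / 10).toNat = m.toNat / 10 by omega,
          show m % 10 = ((m.toNat % 10 : Nat) : Int) by omega]
      push_cast
      rw [one_mul]

theorem solution_eq_alt (n : Int) : solution n = solution_alt n := by
  rw [show solution_alt n = bestB n from rfl, bestB_eq n.toNat n rfl, gNat_eq_fNat]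
  unfold solution
  rcases lt_or_ge n 1 with hn | hn
  · rw [PySem.List.pyRange_one_eq_nil (by omega : n + 1 ≤ 1)]
    rw [show n.toNat = 0 by omega]
    rfl
  · rw [show n + 1 = ((n.toNat : Nat) : Int) + 1 by omega]
    exact A_fold n.toNat

-- ===== VERDICT (by name: the statement is the Claim_ definition above) =====
theorem solution_spec : Claim_equal_solution := by
  intro n _
  unfold Spec_solution
  exact solution_eq_alt n
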